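-- pv_equiv track=rewrite | github.com/thangtran3112/algo | python/graph/kahn-topology/alient_dictionary.py | is_valid_order
-- ===== SOURCE A (Python) =====
-- from collections import defaultdict, deque
-- from typing import List
--
-- def is_valid_order(order: str, words: List[str]) -> bool:
--     """
--     Checks if the generated order satisfies the constraints derived from words.
--     Also checks if all unique characters are present.
--     """
--     if not order and any(len(w) > 0 for w in words): # Handle cases where "" is expected
--          # Need to check if "" was genuinely the correct output (cycle or prefix rule)
--          # This helper assumes a non-empty order is expected if valid
--          pass # Cannot fully validate "" output here easily, rely on direct test comparison
--
--     adj = defaultdict(set)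
--     all_chars = set(c for word in words for c in word)
--
--     # Build adjacency list based on words
--     for w1, w2 in zip(words, words[1:]):
--         min_len = min(len(w1), len(w2))
--         diff_found = False
--         for i in range(min_len):
--             if w1[i] != w2[i]:
--                 if w2[i] not in adj[w1[i]]:
--                     adj[w1[i]].add(w2[i])
--                 diff_found = True
--                 break
--         # Check for prefix rule violation ("abc", "ab")
--         if not diff_found and len(w1) > len(w2):
--             return False # Invalid input, but the function should return ""
--
--     # Check if all unique characters are in the order
--     if set(order) != all_chars:
--         return False
--
--     # Check if the order respects the derived constraints
--     pos = {char: i for i, char in enumerate(order)}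
--     for u in adj:
--         for v in adj[u]:
--             if u not in pos or v not in pos or pos[u] > pos[v]:
--                 return False
--     return True
-- ===== SOURCE B (Python) =====
-- def is_valid_order(order, words):
--     # One fused pass: check the character set first, then validate each adjacent
--     # word pair directly against positions in `order` (no adjacency structure).
--     all_chars = {c for w in words for c in w}
--     if set(order) != all_chars:
--         return False
--     pos = {c: i for i, c in enumerate(order)}
--     for w1, w2 in zip(words, words[1:]):
--         for a, b in zip(w1, w2):
--             if a != b:
--                 if pos[a] > pos[b]:
--                     return False
--                 break
--         else:
--             if len(w1) > len(w2):
--                 return False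
--     return True
-- ===== Notes on version B (the rewrite author's own statement) =====
-- stated objective: simpler
-- what changed: B drops the adjacency-set structure and the separate edge-validation loop entirely: it checks the character-set equality first, builds the position map, and validates each adjacent word pair (first differing character and the prefix rule) directly in one fused pass over zip(words, words[1:]).
import Mathlib
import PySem

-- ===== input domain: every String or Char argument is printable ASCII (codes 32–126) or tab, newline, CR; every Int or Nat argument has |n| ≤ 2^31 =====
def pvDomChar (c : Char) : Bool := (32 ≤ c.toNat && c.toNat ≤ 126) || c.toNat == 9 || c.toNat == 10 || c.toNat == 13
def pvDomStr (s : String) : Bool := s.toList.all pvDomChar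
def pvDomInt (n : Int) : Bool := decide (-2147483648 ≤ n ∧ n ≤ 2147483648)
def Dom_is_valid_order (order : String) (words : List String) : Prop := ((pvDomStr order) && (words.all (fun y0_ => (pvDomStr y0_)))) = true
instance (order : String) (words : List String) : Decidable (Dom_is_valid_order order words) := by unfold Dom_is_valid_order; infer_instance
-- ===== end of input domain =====

-- B drops A's adjacency dict-of-sets and the separate edge-validation loop: after the
-- character-set check it validates each adjacent word pair directly in one fused pass (simpler).

-- ===== PORT A =====
-- inner `for i in range(min_len)` loop with its break: first differing character pair
def aFindDiff (c1 c2 : List Char) : List Int → Option (Char × Char)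
  | [] => none
  | i :: rest =>
    match PySem.List.pyGet? c1 i, PySem.List.pyGet? c2 i with
    | some a, some b => if a ≠ b then some (a, b) else aFindDiff c1 c2 rest
    | _, _ => none   -- unreachable: i ranges over range(min_len)

-- the edge-building loop over zip(words, words[1:]); `none` = the early `return False`
def aBuild (adj : PySem.Dict Char (PySem.Set Char)) :
    List (String × String) → Option (PySem.Dict Char (PySem.Set Char))
  | [] => some adj
  | (w1, w2) :: rest =>
    let c1 := w1.toList
    let c2 := w2.toList
    let minLen := min c1.length c2.length
    match aFindDiff c1 c2 (PySem.List.pyRange 0 (minLen : Int) 1) with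
    | some (u, v) =>
      let s := adj.getD u PySem.Set.empty     -- defaultdict(set) access
      let adj' := if PySem.Set.contains s v then adj else adj.insert u (PySem.Set.add s v)
      aBuild adj' rest
    | none => if decide (c1.length > c2.length) then none else aBuild adj rest

-- the nested `for u in adj: for v in adj[u]:` validation loops with early return
def aCheckBucket (pos : PySem.Dict Char Int) (u : Char) : List Char → Bool
  | [] => true
  | v :: vs =>
    if !pos.contains u || !pos.contains v || decide (pos.getD u 0 > pos.getD v 0) then false
    else aCheckBucket pos u vs

def aCheckAdj (pos : PySem.Dict Char Int) : List (Char × PySem.Set Char) → Bool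
  | [] => true
  | (u, s) :: rest => if aCheckBucket pos u s then aCheckAdj pos rest else false

def is_valid_order (order : String) (words : List String) : Bool :=
  let allChars : PySem.Set Char := PySem.Set.ofList (words.flatMap (fun w => w.toList))
  match aBuild PySem.Dict.empty (words.zip (words.drop 1)) with
  | none => false
  | some adj =>
    if !PySem.Set.equal (PySem.Set.ofList order.toList) allChars then false
    else
      let pos : PySem.Dict Char Int :=
        (PySem.List.enumerate order.toList 0).foldl (fun d p => d.insert p.2 p.1) PySem.Dict.empty
      aCheckAdj pos adj.items

-- ===== PORT B =====
-- one word pair: walk zip(w1, w2); at the first differing characters compare their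
-- positions; the `_::_, []` case is the for-else prefix rule (w1 strictly longer).
-- The `none` lookup branch is unreachable (B runs this only after the character-set
-- equality check, so every character of the words is a key of pos).
def bPairOK (pos : PySem.Dict Char Int) : List Char → List Char → Bool
  | a :: as, b :: bs =>
    if a = b then bPairOK pos as bs
    else
      match pos.get? a, pos.get? b with
      | some pa, some pb => !decide (pa > pb)
      | _, _ => false
  | [], _ => true
  | _ :: _, [] => false

-- the single fused pass over zip(words, words[1:]) with its early `return False`
def bPairs (pos : PySem.Dict Char Int) : List (String × String) → Bool
  | [] => true
  | (w1, w2) :: rest => if bPairOK pos w1.toList w2.toList then bPairs pos rest else false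

def is_valid_order_alt (order : String) (words : List String) : Bool :=
  let allChars : PySem.Set Char := PySem.Set.ofList (words.flatMap (fun w => w.toList))
  if !PySem.Set.equal (PySem.Set.ofList order.toList) allChars then false
  else
    let pos : PySem.Dict Char Int :=
      (PySem.List.enumerate order.toList 0).foldl (fun d p => d.insert p.2 p.1) PySem.Dict.empty
    bPairs pos (words.zip (words.drop 1))

-- ===== PRECONDITION & SPEC =====
def Spec_is_valid_order (order : String) (words : List String) (out : Bool) : Prop := out = is_valid_order_alt order words
instance (order : String) (words : List String) (out : Bool) : Decidable (Spec_is_valid_order order words out) := by unfold Spec_is_valid_order; infer_instance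

-- ===== CLAIM (what is proved, stated in full; the proofs are below) =====
def Claim_equal_is_valid_order : Prop := ∀ (order : String) (words : List String), Dom_is_valid_order order words → Spec_is_valid_order order words (is_valid_order order words)

-- ===== LEMMAS AND PROOFS =====

-- structural first-difference of two character lists
def fd : List Char → List Char → Option (Char × Char)
  | a :: as, b :: bs => if a = b then fd as bs else some (a, b)
  | _, _ => none

-- the position check both programs perform on a differing pair
def eOK (pos : PySem.Dict Char Int) (u v : Char) : Bool :=
  match pos.get? u, pos.get? v with
  | some pa, some pb => !decide (pa > pb)
  | _, _ => false

theorem fd_none_right (c1 : List Char) : fd c1 [] = none := by cases c1 <;> rfl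

theorem aFindDiff_drop (c1 c2 : List Char) (k : Nat) :
    aFindDiff c1 c2 (PySem.List.pyRange (k : Int) ((min c1.length c2.length : Nat) : Int) 1)
      = fd (c1.drop k) (c2.drop k) := by
  by_cases hk : k < min c1.length c2.length
  · rw [PySem.List.pyRange_one_cons (by exact_mod_cast hk)]
    have h1 : k < c1.length := lt_of_lt_of_le hk (Nat.min_le_left _ _)
    have h2 : k < c2.length := lt_of_lt_of_le hk (Nat.min_le_right _ _)
    have g1 : PySem.List.pyGet? c1 (k : Int) = some c1[k] := by
      simp [h1]
    have g2 : PySem.List.pyGet? c2 (k : Int) = some c2[k] := by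
      simp [h2]
    rw [List.drop_eq_getElem_cons h1, List.drop_eq_getElem_cons h2]
    simp only [aFindDiff, g1, g2, fd]
    by_cases he : c1[k] = c2[k]
    · rw [if_pos he, if_neg (by simp [he])]
      have hc : ((k : Int) + 1) = ((k + 1 : Nat) : Int) := by push_cast; ring
      rw [hc]
      exact aFindDiff_drop c1 c2 (k + 1)
    · simp [he]
  · have hr : PySem.List.pyRange (k : Int) ((min c1.length c2.length : Nat) : Int) 1 = [] := by
      simp [PySem.List.pyRange]; omega
    rw [hr]
    have hd : c1.drop k = [] ∨ c2.drop k = [] := by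
      rcases Nat.le_total c1.length c2.length with h | h
      · left; apply List.drop_eq_nil_of_le; omega
      · right; apply List.drop_eq_nil_of_le; omega
    rcases hd with h | h
    · rw [h]; rfl
    · rw [h, fd_none_right]; rfl
  termination_by min c1.length c2.length - k
  decreasing_by omega

theorem aFindDiff_eq (c1 c2 : List Char) :
    aFindDiff c1 c2 (PySem.List.pyRange 0 ((min c1.length c2.length : Nat) : Int) 1) = fd c1 c2 := by
  simpa using aFindDiff_drop c1 c2 0

theorem bucket_step (pos : PySem.Dict Char Int) (u v : Char) :
    (!pos.contains u || !pos.contains v || decide (pos.getD u 0 > pos.getD v 0)) = !eOK pos u v := by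
  unfold eOK
  rw [PySem.Dict.contains_eq_isSome_get? , PySem.Dict.contains_eq_isSome_get?]
  cases hu : pos.get? u with
  | none => simp
  | some pa =>
    cases hv : pos.get? v with
    | none => simp
    | some pb =>
      rw [PySem.Dict.getD_eq_get?_getD, PySem.Dict.getD_eq_get?_getD, hu, hv]
      simp

theorem aCheckBucket_eq_all (pos : PySem.Dict Char Int) (u : Char) (l : List Char) :
    aCheckBucket pos u l = l.all (eOK pos u) := by
  induction l with
  | nil => rfl
  | cons v vs ih =>
    simp only [aCheckBucket, bucket_step, List.all_cons, ih]
    cases eOK pos u v <;> simp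

theorem aCheckAdj_eq_all (pos : PySem.Dict Char Int) (items : List (Char × PySem.Set Char)) :
    aCheckAdj pos items = items.all (fun p => p.2.all (eOK pos p.1)) := by
  induction items with
  | nil => rfl
  | cons p rest ih =>
    obtain ⟨u, s⟩ := p
    simp only [aCheckAdj, aCheckBucket_eq_all, List.all_cons, ih]
    cases s.all (eOK pos u) <;> simp

theorem bPairOK_eq (pos : PySem.Dict Char Int) (c1 c2 : List Char) :
    bPairOK pos c1 c2 =
      (match fd c1 c2 with
       | some (u, v) => eOK pos u v
       | none => decide (c1.length ≤ c2.length)) := by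
  induction c1 generalizing c2 with
  | nil => cases c2 <;> simp [bPairOK, fd]
  | cons a as ih =>
    cases c2 with
    | nil => simp [bPairOK, fd]
    | cons b bs =>
      by_cases h : a = b
      · simp only [bPairOK, fd, if_pos h, ih bs]
        cases hf : fd as bs <;> simp
      · simp [bPairOK, fd, h, eOK]

theorem all_map_replace (pos : PySem.Dict Char Int) (u v : Char) (s0 : PySem.Set Char)
    (items : List (Char × PySem.Set Char)) (hnd : (items.map Prod.fst).Nodup)
    (hmem : (u, s0) ∈ items) (hv : PySem.Set.contains s0 v = false) :
    (items.map (fun p => if p.1 == u then (u, PySem.Set.add s0 v) else p)).all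
        (fun p => p.2.all (eOK pos p.1))
      = (items.all (fun p => p.2.all (eOK pos p.1)) && eOK pos u v) := by
  induction items with
  | nil => simp at hmem
  | cons p rest ih =>
    simp only [List.map_cons, List.nodup_cons] at hnd
    obtain ⟨hnotin, hndr⟩ := hnd
    by_cases hp : p.1 = u
    · have hpe : p = (u, s0) := by
        rcases List.mem_cons.mp hmem with h | h
        · exact h.symm
        · exact absurd (by rw [hp]; exact List.mem_map.mpr ⟨(u, s0), h, rfl⟩) hnotin
      have hrest : rest.map (fun p => if p.1 == u then (u, PySem.Set.add s0 v) else p) = rest := by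
        have h : ∀ q ∈ rest, (if q.1 == u then ((u, PySem.Set.add s0 v) : Char × PySem.Set Char) else q) = q := by
          intro q hq
          have hq1 : (q.1 == u) = false := by
            simp only [beq_eq_false_iff_ne, ne_eq]
            intro he
            exact hnotin (by rw [hp]; exact he ▸ List.mem_map.mpr ⟨q, hq, rfl⟩)
          simp [hq1]
        rw [List.map_congr_left h, List.map_id']
      have hv' : v ∉ s0 := by simpa using hv
      have hadd : PySem.Set.add s0 v = s0 ++ [v] := by simp [PySem.Set.add, hv']
      rw [List.map_cons, hrest, hpe]
      simp only [List.all_cons, beq_self_eq_true, if_true, hadd, List.all_append,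
        List.all_cons, List.all_nil, Bool.and_true]
      cases s0.all (eOK pos u) <;> cases eOK pos u v <;>
        cases rest.all (fun p => p.2.all (eOK pos p.1)) <;> rfl
    · have hmem' : (u, s0) ∈ rest := by
        rcases List.mem_cons.mp hmem with h | h
        · exact absurd (congrArg Prod.fst h.symm) hp
        · exact h
      have hb : (p.1 == u) = false := by simpa using hp
      rw [List.map_cons]
      simp only [List.all_cons, hb, Bool.false_eq_true, if_false, ih hndr hmem']
      rw [Bool.and_assoc]

theorem allCheck_addEdge (pos : PySem.Dict Char Int) (adj : PySem.Dict Char (PySem.Set Char))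
    (u v : Char) (hnd : adj.keys.Nodup) :
    (let s := adj.getD u PySem.Set.empty
     let adj' := if PySem.Set.contains s v then adj else adj.insert u (PySem.Set.add s v)
     adj'.items.all (fun p => p.2.all (eOK pos p.1)))
      = (adj.items.all (fun p => p.2.all (eOK pos p.1)) && eOK pos u v) := by
  simp only []
  by_cases hc : adj.contains u = true
  · obtain ⟨s0, hs0⟩ : ∃ s0, adj.get? u = some s0 := by
      rw [PySem.Dict.contains_eq_isSome_get?] at hc
      exact Option.isSome_iff_exists.mp hc
    have hgd : adj.getD u PySem.Set.empty = s0 := by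
      rw [PySem.Dict.getD_eq_get?_getD, hs0]; rfl
    have hmem : (u, s0) ∈ adj.items := PySem.Dict.mem_items_of_get?_eq_some (d := adj) (h := hs0)
    rw [hgd]
    by_cases hv : PySem.Set.contains s0 v = true
    · rw [if_pos hv]
      have hvm : v ∈ s0 := by simpa using hv
      cases ha : adj.items.all (fun p => p.2.all (eOK pos p.1)) with
      | false => rfl
      | true =>
        have : eOK pos u v = true := by
          have h1 := (List.all_eq_true.mp ha) _ hmem
          exact List.all_eq_true.mp h1 _ hvm
        rw [this]; rfl
    · rw [if_neg hv]
      rw [PySem.Dict.items_insert_of_contains (h := hc)]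
      exact all_map_replace pos u v s0 adj.items hnd hmem (by simpa using hv)
  · have hcf : adj.contains u = false := by simpa using hc
    have hgd : adj.getD u PySem.Set.empty = PySem.Set.empty := by
      rw [PySem.Dict.getD_eq_get?_getD]
      rw [(PySem.Dict.get?_eq_none_iff_contains _ _).mpr hcf]; rfl
    rw [hgd]
    rw [if_neg (by simp [PySem.Set.contains, PySem.Set.empty])]
    rw [PySem.Dict.items_insert_of_not_contains (h := hcf)]
    simp


theorem build_inv (pos : PySem.Dict Char Int) (pairs : List (String × String)) :
    ∀ (adj : PySem.Dict Char (PySem.Set Char)), adj.keys.Nodup →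
    (match aBuild adj pairs with
     | none => false
     | some adj' => aCheckAdj pos adj'.items)
      = (aCheckAdj pos adj.items && bPairs pos pairs) := by
  induction pairs with
  | nil => intro adj hnd; simp [aBuild, bPairs]
  | cons pr rest ih =>
    intro adj hnd
    obtain ⟨w1, w2⟩ := pr
    simp only [aBuild, bPairs, aFindDiff_eq, bPairOK_eq]
    cases hf : fd w1.toList w2.toList with
    | none =>
      by_cases hl : w1.toList.length > w2.toList.length
      · have hd : decide (w1.toList.length ≤ w2.toList.length) = false := by
          rw [decide_eq_false_iff_not]; omega
        rw [if_pos (by simpa using hl), hd]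
        simp
      · have hd : decide (w1.toList.length ≤ w2.toList.length) = true := by
          rw [decide_eq_true_eq]; omega
        rw [if_neg (by simpa using hl), ih adj hnd, hd]
        simp
    | some uv =>
      obtain ⟨u, v⟩ := uv
      have hnd' : (if PySem.Set.contains (adj.getD u PySem.Set.empty) v then adj
          else adj.insert u (PySem.Set.add (adj.getD u PySem.Set.empty) v)).keys.Nodup := by
        split
        · exact hnd
        · exact PySem.Dict.nodup_keys_insert adj _ _ hnd
      rw [ih _ hnd']
      rw [aCheckAdj_eq_all, aCheckAdj_eq_all, allCheck_addEdge pos adj u v hnd]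
      rw [← aCheckAdj_eq_all]
      cases ha : aCheckAdj pos adj.items <;> cases he : eOK pos u v <;> simp [he]

-- ===== VERDICT (by name: the statement is the Claim_ definition above) =====
theorem is_valid_order_spec : Claim_equal_is_valid_order := by
  intro order words _
  unfold Spec_is_valid_order is_valid_order is_valid_order_alt
  cases hE : PySem.Set.equal (PySem.Set.ofList order.toList)
      (PySem.Set.ofList (words.flatMap (fun w => w.toList))) with
  | false =>
    cases hb : aBuild PySem.Dict.empty (words.zip (words.drop 1)) <;> simp [hE]
  | true =>
    simp only [hE, Bool.not_true, Bool.false_eq_true, if_false]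
    have := build_inv
      ((PySem.List.enumerate order.toList 0).foldl (fun d p => d.insert p.2 p.1) PySem.Dict.empty)
      (words.zip (words.drop 1)) PySem.Dict.empty (by simp [PySem.Dict.keys, PySem.Dict.empty])
    simpa [aCheckAdj] using this
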